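-- pv_equiv track=rewrite | github.com/elmorem/dartboard_rig | dartboard/ingestion/metadata_extractors.py | extract_page_mapping
-- ===== SOURCE A (Python) =====
-- from typing import List, Dict, Any, Optional, Tuple
--
-- def extract_page_mapping(page_texts: List[str]) -> List[Tuple[int, int, int]]:
--     """
--     Create mapping of character positions to page numbers.
--
--     Args:
--         page_texts: List of text strings, one per page
--
--     Returns:
--         List of (start_char, end_char, page_number) tuples
--     """
--     mappings = []
--     current_pos = 0
--
--     for page_num, page_text in enumerate(page_texts, start=1):
--         start_pos = current_pos
--         end_pos = current_pos + len(page_text)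
--
--         if page_text.strip():  # Only include non-empty pages
--             mappings.append((start_pos, end_pos, page_num))
--
--         # Account for newlines added between pages
--         current_pos = end_pos + 2  # "\n\n" between pages
--
--     return mappings
-- ===== SOURCE B (Python) =====
-- def extract_page_mapping(page_texts):
--     # Build prefix table of page start offsets, then filter/map in a second pass.
--     starts = [0]
--     for t in page_texts:
--         starts.append(starts[-1] + len(t) + 2)
--     return [(s, s + len(t), i)
--             for i, (s, t) in enumerate(zip(starts, page_texts), start=1)
--             if t.strip()]
-- ===== Notes on version B (the rewrite author's own statement) =====
-- stated objective: alternative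
-- what changed: Replaces the fused accumulator loop with a prefix-offset table built first, followed by a separate filter/map comprehension over enumerate(zip(starts, page_texts)).
import Mathlib
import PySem

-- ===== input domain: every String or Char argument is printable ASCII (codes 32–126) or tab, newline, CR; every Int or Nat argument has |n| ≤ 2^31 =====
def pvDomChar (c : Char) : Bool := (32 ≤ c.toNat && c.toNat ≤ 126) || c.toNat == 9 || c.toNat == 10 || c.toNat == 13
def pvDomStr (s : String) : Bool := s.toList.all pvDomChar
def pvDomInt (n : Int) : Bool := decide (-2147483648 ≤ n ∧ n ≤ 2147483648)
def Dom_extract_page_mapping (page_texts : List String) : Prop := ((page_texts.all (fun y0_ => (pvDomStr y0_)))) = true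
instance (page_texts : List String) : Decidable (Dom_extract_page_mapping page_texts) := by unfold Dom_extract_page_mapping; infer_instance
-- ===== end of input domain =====

-- B builds a prefix table of page start offsets first, then filters/maps in a second pass (alternative decomposition, same cost).

-- ===== PORT A =====
-- single fused loop: accumulator (mappings, current_pos) over enumerate(page_texts, 1)
def extract_page_mapping (page_texts : List String) : List (Int × Int × Int) :=
  ((PySem.List.enumerate page_texts 1).foldl
    (fun (st : List (Int × Int × Int) × Int) p =>
      let start_pos := st.2
      let end_pos := st.2 + PySem.Str.len p.2
      let mappings := if PySem.Str.strip p.2 ≠ "" then st.1 ++ [(start_pos, end_pos, p.1)] else st.1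
      (mappings, end_pos + 2)) ([], 0)).1

-- ===== PORT B =====
-- the 'starts' loop of Source B: starts.append(starts[-1] + len(t) + 2), seeded with [0]
def pvStarts_extract_page_mapping : List String → Int → List Int
  | [], last => [last]
  | t :: ts, last => last :: pvStarts_extract_page_mapping ts (last + PySem.Str.len t + 2)

def extract_page_mapping_alt (page_texts : List String) : List (Int × Int × Int) :=
  (PySem.List.enumerate ((pvStarts_extract_page_mapping page_texts 0).zip page_texts) 1).filterMap
    (fun p => if PySem.Str.strip p.2.2 ≠ "" then some (p.2.1, p.2.1 + PySem.Str.len p.2.2, p.1) else none)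

-- ===== PRECONDITION & SPEC =====
def Spec_extract_page_mapping (page_texts : List String) (out : List (Int × Int × Int)) : Prop := out = extract_page_mapping_alt page_texts
instance (page_texts : List String) (out : List (Int × Int × Int)) : Decidable (Spec_extract_page_mapping page_texts out) := by unfold Spec_extract_page_mapping; infer_instance

-- ===== CLAIM (what is proved, stated in full; the proofs are below) =====
def Claim_equal_extract_page_mapping : Prop := ∀ (page_texts : List String), Dom_extract_page_mapping page_texts → Spec_extract_page_mapping page_texts (extract_page_mapping page_texts)

-- ===== LEMMAS AND PROOFS =====
theorem pv_fold_eq (page_texts : List String) :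
    ∀ (k : Int) (pos : Int) (acc : List (Int × Int × Int)),
    ((PySem.List.enumerate page_texts k).foldl
      (fun (st : List (Int × Int × Int) × Int) p =>
        let start_pos := st.2
        let end_pos := st.2 + PySem.Str.len p.2
        let mappings := if PySem.Str.strip p.2 ≠ "" then st.1 ++ [(start_pos, end_pos, p.1)] else st.1
        (mappings, end_pos + 2)) (acc, pos)).1
    = acc ++ (PySem.List.enumerate ((pvStarts_extract_page_mapping page_texts pos).zip page_texts) k).filterMap
        (fun p => if PySem.Str.strip p.2.2 ≠ "" then some (p.2.1, p.2.1 + PySem.Str.len p.2.2, p.1) else none) := by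
  induction page_texts with
  | nil => intro k pos acc; simp [PySem.List.enumerate, pvStarts_extract_page_mapping]
  | cons t ts ih =>
    intro k pos acc
    simp only [pvStarts_extract_page_mapping, List.zip_cons_cons, PySem.List.enumerate_cons,
      List.foldl_cons, List.filterMap_cons]
    rw [ih]
    split_ifs with h <;> simp

-- ===== VERDICT (by name: the statement is the Claim_ definition above) =====
theorem extract_page_mapping_spec : Claim_equal_extract_page_mapping := by
  intro page_texts _
  show _ = _
  unfold extract_page_mapping extract_page_mapping_alt
  rw [pv_fold_eq]
  simp
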